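-- pv_equiv track=rewrite | github.com/Sunilkumarsahu11/Python-practice | codility/GibonacciSeries.py | solution
-- ===== SOURCE A (Python) =====
-- def solution(n:int,x:int,y:int):
--     res = [-1]*6
--     n = n%6
--
--     res[0]=x
--     res[1]=y
--     for i in range(2,6):
--         res[i]=res[i-1]-res[i-2]
--
--     return res[n]
-- ===== SOURCE B (Python) =====
-- def solution(n: int, x: int, y: int):
--     # The recurrence a[i] = a[i-1] - a[i-2] starting x, y is periodic with period 6:
--     # x, y, y-x, -x, -y, x-y, x, y, ...  so the answer is a direct closed-form lookup.
--     return (x, y, y - x, -x, -y, x - y)[n % 6]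
-- ===== Notes on version B (the rewrite author's own statement) =====
-- stated objective: simpler
-- what changed: Replaces the array-building recurrence loop with a direct closed-form tuple lookup of the period-6 cycle indexed by n % 6.
import Mathlib
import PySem

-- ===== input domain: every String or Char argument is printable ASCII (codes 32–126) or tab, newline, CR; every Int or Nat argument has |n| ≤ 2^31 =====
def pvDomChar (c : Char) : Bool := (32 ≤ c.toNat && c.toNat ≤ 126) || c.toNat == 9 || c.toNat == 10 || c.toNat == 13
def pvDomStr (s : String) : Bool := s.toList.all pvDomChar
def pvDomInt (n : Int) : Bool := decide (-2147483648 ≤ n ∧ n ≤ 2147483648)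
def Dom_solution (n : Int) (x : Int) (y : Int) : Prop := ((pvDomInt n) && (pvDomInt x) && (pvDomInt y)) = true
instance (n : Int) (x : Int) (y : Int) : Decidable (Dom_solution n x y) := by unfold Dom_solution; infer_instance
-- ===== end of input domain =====

-- B replaces A's array-building recurrence loop with a direct closed-form lookup of the
-- period-6 cycle (x, y, y-x, -x, -y, x-y) indexed by n % 6 (objective: simpler).


-- ===== PORT A =====
-- res = [-1]*6; n = n%6; res[0]=x; res[1]=y; for i in range(2,6): res[i]=res[i-1]-res[i-2]; return res[n]
-- (every index is always in range here, so the IndexError branch (.getD 0) is unreachable)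
def solution (n : Int) (x : Int) (y : Int) : Int :=
  let res : List Int := List.replicate 6 (-1)
  let nn : Int := PySem.Int.mod n 6
  let res := res.set 0 x
  let res := res.set 1 y
  let res := (PySem.List.pyRange 2 6 1).foldl
    (fun r i =>
      r.set i.toNat ((PySem.List.pyGet? r (i - 1)).getD 0 - (PySem.List.pyGet? r (i - 2)).getD 0))
    res
  (PySem.List.pyGet? res nn).getD 0

-- ===== PORT B =====
-- return (x, y, y-x, -x, -y, x-y)[n % 6]   (n % 6 is always in 0..5, so .getD 0 is unreachable)
def solution_alt (n : Int) (x : Int) (y : Int) : Int :=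
  (PySem.List.pyGet? [x, y, y - x, -x, -y, x - y] (PySem.Int.mod n 6)).getD 0

-- ===== PRECONDITION & SPEC =====
def Spec_solution (n : Int) (x : Int) (y : Int) (out : Int) : Prop := out = solution_alt n x y
instance (n : Int) (x : Int) (y : Int) (out : Int) : Decidable (Spec_solution n x y out) := by unfold Spec_solution; infer_instance

-- ===== CLAIM (what is proved, stated in full; the proofs are below) =====
def Claim_equal_solution : Prop := ∀ (n : Int) (x : Int) (y : Int), Dom_solution n x y → Spec_solution n x y (solution n x y)

-- ===== LEMMAS AND PROOFS =====
-- A's loop over range(2,6) builds exactly the six cycle entries B looks up.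
theorem fold_builds_cycle (x y : Int) :
    (PySem.List.pyRange 2 6 1).foldl
      (fun (r : List Int) i =>
        r.set i.toNat ((PySem.List.pyGet? r (i - 1)).getD 0 - (PySem.List.pyGet? r (i - 2)).getD 0))
      [x, y, -1, -1, -1, -1] = [x, y, y - x, -x, -y, x - y] := by
  simp [PySem.List.pyRange, PySem.List.pyGet?, PySem.List.pyIdx?, List.range_succ]
  and_intros <;> ring

-- ===== VERDICT (by name: the statement is the Claim_ definition above) =====
theorem solution_spec : Claim_equal_solution := by
  intro n x y _
  unfold Spec_solution
  simp only [solution, solution_alt, List.replicate, List.set, fold_builds_cycle]
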